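-- pv_equiv track=rewrite | github.com/degrado-lab/ligand-vdGs | ligand_vdgs/functions/run_smarts_to_cg_df.py | invert_substruct_match
-- ===== SOURCE A (Python) =====
-- def invert_substruct_match(match, n_atoms):
--     """Get the inverse mapping of a substructure match.
--
--     Parameters
--     ----------
--     match : tuple
--         Tuple of atom indices in a mol corresponding to zero-indexed
--         atoms of a substructure mol.
--     n_atoms : int
--         Number of atoms in mol.
--
--     Returns
--     -------
--     inv_match : tuple
--         Tuple of atom indices in the substructure corresponding to
--         zero-indexed atoms in the original mol.  Atoms in the mol
--         without matches in the substructure are assigned -1.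
--     """
--     inv_match = []
--     for i in range(n_atoms):
--         if i in match:
--             inv_match.append(match.index(i))
--         else:
--             inv_match.append(-1)
--     inv_match = tuple(inv_match)
--     return inv_match
-- ===== SOURCE B (Python) =====
-- def invert_substruct_match(match, n_atoms):
--     inv = [-1] * n_atoms if n_atoms > 0 else []
--     for pos, atom in enumerate(match):
--         if 0 <= atom < n_atoms and inv[atom] == -1:
--             inv[atom] = pos
--     return tuple(inv)
-- ===== Notes on version B (the rewrite author's own statement) =====
-- stated objective: faster
-- what changed: Replaces the per-atom scan of match ('i in match' plus 'match.index(i)', both linear in len(match)) by preallocating a -1-filled list and scattering each match position into its slot in one enumerate pass (first write wins, out-of-range entries skipped).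
import Mathlib
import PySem

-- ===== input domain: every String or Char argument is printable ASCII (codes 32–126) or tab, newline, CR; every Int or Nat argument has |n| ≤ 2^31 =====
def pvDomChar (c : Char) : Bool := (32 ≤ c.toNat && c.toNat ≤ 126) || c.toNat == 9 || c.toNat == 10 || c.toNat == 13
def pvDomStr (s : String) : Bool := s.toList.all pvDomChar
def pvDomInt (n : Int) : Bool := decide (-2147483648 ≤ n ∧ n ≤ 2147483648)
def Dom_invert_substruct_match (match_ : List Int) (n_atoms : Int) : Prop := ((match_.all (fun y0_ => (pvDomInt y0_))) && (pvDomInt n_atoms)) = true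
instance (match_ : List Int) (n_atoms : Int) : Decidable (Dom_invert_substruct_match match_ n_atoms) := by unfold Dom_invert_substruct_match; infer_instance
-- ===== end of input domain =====

-- B replaces A's per-atom scans of match ('i in match' + 'match.index(i)') by a single scatter pass into a preallocated list.

-- ===== PORT A =====
-- for i in range(n_atoms): append match.index(i) if i in match else -1
def invert_substruct_match (match_ : List Int) (n_atoms : Int) : List Int :=
  (PySem.List.pyRange 0 n_atoms 1).foldl
    (fun inv i =>
      if i ∈ match_ then inv ++ [(((PySem.List.index? match_ i).getD 0 : Nat) : Int)]
      else inv ++ [-1]) []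

-- ===== PORT B =====
-- one enumerate step: write pos into slot atom if atom is in range and the slot is still -1
def pvStepB (n_atoms : Int) (inv : List Int) (pa : Int × Int) : List Int :=
  if 0 ≤ pa.2 ∧ pa.2 < n_atoms ∧ inv.getD pa.2.toNat 0 = -1 then inv.set pa.2.toNat pa.1 else inv

def invert_substruct_match_alt (match_ : List Int) (n_atoms : Int) : List Int :=
  (PySem.List.enumerate match_ 0).foldl (pvStepB n_atoms) (List.replicate n_atoms.toNat (-1))

-- ===== PRECONDITION & SPEC =====
def Spec_invert_substruct_match (match_ : List Int) (n_atoms : Int) (out : List Int) : Prop := out = invert_substruct_match_alt match_ n_atoms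
instance (match_ : List Int) (n_atoms : Int) (out : List Int) : Decidable (Spec_invert_substruct_match match_ n_atoms out) := by unfold Spec_invert_substruct_match; infer_instance

-- ===== CLAIM (what is proved, stated in full; the proofs are below) =====
def Claim_equal_invert_substruct_match : Prop := ∀ (match_ : List Int) (n_atoms : Int), Dom_invert_substruct_match match_ n_atoms → Spec_invert_substruct_match match_ n_atoms (invert_substruct_match match_ n_atoms)

-- ===== LEMMAS AND PROOFS =====

-- the common value of slot i
def pvVal (match_ : List Int) (i : Int) : Int :=
  if i ∈ match_ then (((PySem.List.index? match_ i).getD 0 : Nat) : Int) else -1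

theorem pvA_eq_map (match_ : List Int) (n_atoms : Int) :
    invert_substruct_match match_ n_atoms
      = (PySem.List.pyRange 0 n_atoms 1).map (pvVal match_) := by
  unfold invert_substruct_match
  have hf : (fun (inv : List Int) (i : Int) =>
      if i ∈ match_ then inv ++ [(((PySem.List.index? match_ i).getD 0 : Nat) : Int)]
      else inv ++ [-1]) = fun inv i => inv ++ [pvVal match_ i] := by
    funext inv i; unfold pvVal; split <;> rfl
  rw [hf, PySem.List.foldl_append_singleton_eq_map, List.nil_append]

theorem pvStepB_length (n_atoms : Int) (inv : List Int) (pa : Int × Int) :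
    (pvStepB n_atoms inv pa).length = inv.length := by
  unfold pvStepB; split <;> simp

theorem pvFoldB_length (ms : List (Int × Int)) (n_atoms : Int) (inv : List Int) :
    (ms.foldl (pvStepB n_atoms) inv).length = inv.length := by
  induction ms generalizing inv with
  | nil => rfl
  | cons p t ih => simpa [List.foldl_cons, pvStepB_length] using ih (pvStepB n_atoms inv p)

-- key invariant of the scatter loop: slot j of the fold result
theorem pvFoldB_getD (ms : List Int) (s n_atoms : Int) (hs : 0 ≤ s)
    (inv : List Int) (hlen : inv.length = n_atoms.toNat) (j : Nat) (hj : j < inv.length) :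
    ((PySem.List.enumerate ms s).foldl (pvStepB n_atoms) inv).getD j 0
      = if inv.getD j 0 = -1 ∧ (j : Int) ∈ ms
        then s + (((PySem.List.index? ms (j : Int)).getD 0 : Nat) : Int)
        else inv.getD j 0 := by
  induction ms generalizing s inv with
  | nil => simp [PySem.List.enumerate_nil]
  | cons a t ih =>
    rw [PySem.List.enumerate_cons, List.foldl_cons]
    have hjn : (j : Int) < n_atoms := by omega
    by_cases hja : a = (j : Int)
    · subst hja
      by_cases hslot : inv.getD j 0 = -1
      · have hstep : pvStepB n_atoms inv (s, (j : Int)) = inv.set j s := by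
          unfold pvStepB
          rw [if_pos ⟨Int.natCast_nonneg j, hjn, by simpa using hslot⟩]
          simp
        rw [hstep,
          ih (s + 1) (by omega) _ (by simp [hlen]) (by simpa using hj)]
        have hset : (inv.set j s).getD j 0 = s := by
          rw [List.getD_eq_getElem _ _ (by simpa using hj)]
          simp
        rw [hset, if_neg (by rintro ⟨h, -⟩; omega),
          if_pos ⟨hslot, by simp⟩, PySem.List.index?_cons_self]
        simp
      · have hstep : pvStepB n_atoms inv (s, (j : Int)) = inv := by
          unfold pvStepB
          rw [if_neg]
          rintro ⟨-, -, h⟩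
          exact hslot (by simpa using h)
        rw [hstep, ih (s + 1) (by omega) _ hlen hj,
          if_neg (fun h => hslot h.1), if_neg (fun h => hslot h.1)]
    · have hstep : (pvStepB n_atoms inv (s, a)).getD j 0 = inv.getD j 0 := by
        unfold pvStepB
        split
        · next h =>
          have hne : a.toNat ≠ j := fun he => hja (by omega)
          rw [List.getD_eq_getElem _ _ (by simpa using hj),
            List.getElem_set_ne (by omega), ← List.getD_eq_getElem _ _ hj]
        · rfl
      rw [ih (s + 1) (by omega) _ (by rw [pvStepB_length]; exact hlen)
          (by rw [pvStepB_length]; exact hj), hstep]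
      by_cases hslot : inv.getD j 0 = -1
      · by_cases hmt : (j : Int) ∈ t
        · obtain ⟨k, hk⟩ := Option.isSome_iff_exists.mp
            ((PySem.List.index?_isSome_iff t ((j : Nat) : Int)).2 hmt)
          rw [if_pos ⟨hslot, hmt⟩,
            if_pos ⟨hslot, List.mem_cons_of_mem _ hmt⟩,
            PySem.List.index?_cons_of_ne _ (fun he => hja he), hk]
          simp only [Option.map_some, Option.getD_some]
          push_cast; ring
        · rw [if_neg (by rintro ⟨-, h⟩; exact hmt h),
            if_neg (by
              rintro ⟨-, h⟩
              rcases List.mem_cons.mp h with h1 | h1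
              · exact hja h1.symm
              · exact hmt h1)]
      · rw [if_neg (fun h => hslot h.1), if_neg (fun h => hslot h.1)]

theorem pvB_getD (match_ : List Int) (n_atoms : Int) (j : Nat) (hj : j < n_atoms.toNat) :
    (invert_substruct_match_alt match_ n_atoms).getD j 0 = pvVal match_ (j : Int) := by
  unfold invert_substruct_match_alt pvVal
  rw [pvFoldB_getD match_ 0 n_atoms le_rfl _ (by simp) j (by simpa using hj)]
  by_cases hm : (j : Int) ∈ match_
  · simp [hm, hj]
  · simp [hm, hj]

-- ===== VERDICT (by name: the statement is the Claim_ definition above) =====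
theorem invert_substruct_match_spec : Claim_equal_invert_substruct_match := by
  intro match_ n_atoms _
  unfold Spec_invert_substruct_match
  have hlenB : (invert_substruct_match_alt match_ n_atoms).length = n_atoms.toNat := by
    unfold invert_substruct_match_alt; rw [pvFoldB_length]; simp
  rw [pvA_eq_map]
  apply List.ext_getElem
  · rw [List.length_map, PySem.List.length_pyRange_one, hlenB]
    simp
  · intro i h1 h2
    have hi : i < n_atoms.toNat := by rw [hlenB] at h2; exact h2
    rw [List.getElem_map, PySem.List.getElem_pyRange_one]
    have hB := pvB_getD match_ n_atoms i hi
    rw [List.getD_eq_getElem _ _ h2] at hB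
    rw [hB]
    simp
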